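-- pv_equiv track=rewrite | github.com/song9018/GUI | common.py | yf_2byte_list
-- ===== SOURCE A (Python) =====
-- def yf_byte(two_byte, rever=False):
--     assert len(two_byte) == 4
--     if rever:
--         return two_byte[2:4] + two_byte[0:2]
--     else:
--         return two_byte
--
-- def yf_2byte_list(buf, rever=False):
--     buf_list = []
--     two_byte = ''
--     i = 0
--     for tmp in buf:
--         # print tmp
--         two_byte += tmp
--         i += 1
--         if i == 4:
--             buf_list.append('0x' + yf_byte(two_byte, rever))
--             two_byte = ''
--             i = 0
--     # if i != 0:
--     #    print buf_list
--     assert i == 0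
--     return buf_list
-- ===== SOURCE B (Python) =====
-- def yf_2byte_list(buf, rever=False):
--     assert len(buf) % 4 == 0
--     if not buf:
--         return []
--     head = buf[:4]
--     tok = '0x' + (head[2:4] + head[0:2] if rever else head)
--     return [tok] + yf_2byte_list(buf[4:], rever)
-- ===== Notes on version B (the rewrite author's own statement) =====
-- stated objective: simpler
-- what changed: Replaces the per-character accumulator-and-counter loop with a direct recursion that peels one 4-char chunk per step via slicing; the length check becomes a single upfront len(buf)%4 assertion.
import Mathlib
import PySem

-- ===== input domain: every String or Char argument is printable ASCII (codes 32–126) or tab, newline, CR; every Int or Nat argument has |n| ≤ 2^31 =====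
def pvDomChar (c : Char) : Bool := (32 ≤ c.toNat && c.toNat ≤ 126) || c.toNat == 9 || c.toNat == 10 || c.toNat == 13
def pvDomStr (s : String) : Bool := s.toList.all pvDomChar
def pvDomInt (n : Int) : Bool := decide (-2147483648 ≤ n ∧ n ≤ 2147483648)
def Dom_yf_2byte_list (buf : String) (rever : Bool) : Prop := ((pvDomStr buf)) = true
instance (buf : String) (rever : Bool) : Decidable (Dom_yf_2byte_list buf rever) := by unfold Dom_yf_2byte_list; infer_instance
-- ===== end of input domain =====

-- B peels one 4-char chunk per recursive step (slice-based) instead of A's per-character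
-- accumulator-and-counter loop; equally fast, shorter/simpler.

-- ===== PORT A =====
-- yf_byte: two_byte[2:4] + two_byte[0:2] if rever else two_byte
def pvYfByte (twoByte : List Char) (rever : Bool) : List Char :=
  if rever then
    PySem.List.slice twoByte (some 2) (some 4) ++ PySem.List.slice twoByte (some 0) (some 2)
  else twoByte

-- one iteration of A's for-loop body, state = (buf_list, two_byte, i)
def pvStepA (rever : Bool) (s : List String × List Char × Nat) (tmp : Char) :
    List String × List Char × Nat :=
  let twoByte := s.2.1 ++ [tmp]
  let i := s.2.2 + 1
  if i = 4 then (s.1 ++ [String.ofList ('0' :: 'x' :: pvYfByte twoByte rever)], [], 0)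
  else (s.1, twoByte, i)

def yf_2byte_list (buf : String) (rever : Bool) : List String :=
  (buf.toList.foldl (pvStepA rever) ([], [], 0)).1
  -- the final `assert i == 0` raises exactly when len(buf) % 4 ≠ 0: excluded by Pre_

-- ===== PORT B =====
-- buf[:4] / buf[4:] / head[2:4] / head[0:2] are nonnegative slices = take/drop (PySem.List.slice_natCast exact)
def pvChunksB (rever : Bool) (l : List Char) : List String :=
  if h : l = [] then []
  else
    let head := l.take 4
    let tok := '0' :: 'x' :: (if rever then (head.drop 2).take 2 ++ head.take 2 else head)
    String.ofList tok :: pvChunksB rever (l.drop 4)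
termination_by l.length
decreasing_by
  have := List.length_pos_iff.mpr h
  simp
  omega

def yf_2byte_list_alt (buf : String) (rever : Bool) : List String :=
  pvChunksB rever buf.toList
  -- the upfront `assert len(buf) % 4 == 0` raises exactly outside Pre_

-- ===== PRECONDITION & SPEC =====
-- A (and B) raise AssertionError unless len(buf) is a multiple of 4.
def Pre_yf_2byte_list (buf : String) (rever : Bool) : Prop := buf.toList.length % 4 = 0
instance (buf : String) (rever : Bool) : Decidable (Pre_yf_2byte_list buf rever) := by
  unfold Pre_yf_2byte_list; infer_instance

def pvWitness_yf_2byte_list : String × Bool := ("1a2bcdef", true)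

def Spec_yf_2byte_list (buf : String) (rever : Bool) (out : List String) : Prop := out = yf_2byte_list_alt buf rever
instance (buf : String) (rever : Bool) (out : List String) : Decidable (Spec_yf_2byte_list buf rever out) := by unfold Spec_yf_2byte_list; infer_instance

-- ===== CLAIM (what is proved, stated in full; the proofs are below) =====
def Claim_equal_yf_2byte_list : Prop := ∀ (buf : String) (rever : Bool), Dom_yf_2byte_list buf rever → Pre_yf_2byte_list buf rever → Spec_yf_2byte_list buf rever (yf_2byte_list buf rever)

-- ===== LEMMAS AND PROOFS =====

lemma pvChunksB_nil (rever : Bool) : pvChunksB rever [] = [] := by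
  rw [pvChunksB.eq_def]; simp

lemma pvChunksB_cons4 (rever : Bool) (a b c d : Char) (rest : List Char) :
    pvChunksB rever (a :: b :: c :: d :: rest) =
      String.ofList ('0' :: 'x' :: (if rever then [c, d, a, b] else [a, b, c, d])) ::
        pvChunksB rever rest := by
  rw [pvChunksB.eq_def]
  simp [List.take, List.drop]

lemma pvLoopA_eq (rever : Bool) :
    ∀ (n : ℕ) (l : List Char) (acc : List String), l.length = 4 * n →
      l.foldl (pvStepA rever) (acc, [], 0) = (acc ++ pvChunksB rever l, [], 0) := by
  intro n
  induction n with
  | zero =>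
      intro l acc hl
      have : l = [] := List.length_eq_zero_iff.mp (by omega)
      subst this
      simp [pvChunksB_nil]
  | succ n ih =>
      intro l acc hl
      match l, hl with
      | a :: b :: c :: d :: rest, hl =>
        have hrest : rest.length = 4 * n := by simp at hl; omega
        simp only [List.foldl]
        rw [show pvStepA rever (acc, [], 0) a = (acc, [a], 1) by simp [pvStepA],
            show pvStepA rever (acc, [a], 1) b = (acc, [a, b], 2) by simp [pvStepA],
            show pvStepA rever (acc, [a, b], 2) c = (acc, [a, b, c], 3) by simp [pvStepA],
            show pvStepA rever (acc, [a, b, c], 3) d =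
              (acc ++ [String.ofList ('0' :: 'x' :: pvYfByte [a, b, c, d] rever)], [], 0) by
              simp [pvStepA]]
        rw [ih rest _ hrest, pvChunksB_cons4]
        have hbyte : pvYfByte [a, b, c, d] rever =
            (if rever then [c, d, a, b] else [a, b, c, d]) := by
          cases rever <;> simp [pvYfByte, PySem.List.slice, PySem.List.clampIdx]
        rw [hbyte]
        simp

-- ===== VERDICT (by name: the statement is the Claim_ definition above) =====
theorem yf_2byte_list_spec : Claim_equal_yf_2byte_list := by
  intro buf rever _ hpre
  have hpre' : buf.toList.length % 4 = 0 := hpre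
  have ⟨n, hn⟩ : ∃ n, buf.toList.length = 4 * n :=
    ⟨buf.toList.length / 4, by omega⟩
  unfold Spec_yf_2byte_list yf_2byte_list yf_2byte_list_alt
  rw [pvLoopA_eq rever n _ [] hn]
  simp
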